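-- pv_equiv track=rewrite | github.com/belynnn/I3_WAD_2024_Python | Notes/Notes Formateurs/20240411/long_exo_v2.py | renvoie_tableau_serpent
-- ===== SOURCE A (Python) =====
-- def renvoie_tableau_serpent(num_lines, num_cols):
--     result = []
--
--     elem = 1
--     # en_arriere = False
--     for i in range(num_lines):
--         line = []
--         for j in range(num_cols):
--             # if en_arriere:
--             if i % 2 == 1:
--                 line.insert(0, elem)
--             else:
--                 line.append(elem)
--             elem += 1
--         result.append(line)
--         # en_arriere = not en_arriere
--
--
--     return result
-- ===== SOURCE B (Python) =====
-- def renvoie_tableau_serpent(num_lines, num_cols):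
--     # Phase 1: build the full flat sequence of values once.
--     num_cells = max(num_lines, 0) * max(num_cols, 0)
--     flat = list(range(1, num_cells + 1))
--     # Phase 2: reshape it into rows, reversing every odd row.
--     result = []
--     for i in range(num_lines):
--         row = flat[i * num_cols:(i + 1) * num_cols]
--         if i % 2 == 1:
--             row = list(reversed(row))
--         result.append(row)
--     return result
-- ===== Notes on version B (the rewrite author's own statement) =====
-- stated objective: alternative
-- what changed: Replaces the element-by-element counter with insert(0)/append inside a nested double loop by a two-phase build-then-reshape: compute the flat list range(1, n*m+1) once, then slice each row out of it and reverse the odd-indexed slices.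
import Mathlib
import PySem

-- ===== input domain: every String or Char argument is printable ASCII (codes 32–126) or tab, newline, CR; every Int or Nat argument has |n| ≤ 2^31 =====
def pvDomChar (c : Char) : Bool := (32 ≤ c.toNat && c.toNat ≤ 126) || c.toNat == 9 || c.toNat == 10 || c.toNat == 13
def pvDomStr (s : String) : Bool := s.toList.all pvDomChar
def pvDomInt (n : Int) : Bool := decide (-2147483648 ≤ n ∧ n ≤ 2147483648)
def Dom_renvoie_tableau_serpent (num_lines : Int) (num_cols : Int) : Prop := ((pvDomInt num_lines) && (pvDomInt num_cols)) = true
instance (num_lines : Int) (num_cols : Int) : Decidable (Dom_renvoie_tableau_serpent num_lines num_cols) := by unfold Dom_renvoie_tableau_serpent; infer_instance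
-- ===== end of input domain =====

-- B builds the flat list of values once and reshapes it into (odd-reversed) row slices,
-- instead of A's nested per-element counter loop; objective: alternative decomposition.

-- ===== PORT A =====
def renvoie_tableau_serpent (num_lines : Int) (num_cols : Int) : List (List Int) :=
  -- state: (result, elem)
  let s := (PySem.List.pyRange 0 num_lines 1).foldl
    (fun (st : List (List Int) × Int) i =>
      -- inner state: (line, elem)
      let inner := (PySem.List.pyRange 0 num_cols 1).foldl
        (fun (ls : List Int × Int) _j =>
          (if i % 2 == 1 then PySem.List.insert ls.1 0 ls.2 else ls.1 ++ [ls.2],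
           ls.2 + 1))
        ([], st.2)
      (st.1 ++ [inner.1], inner.2))
    ([], 1)
  s.1

-- ===== PORT B =====
def renvoie_tableau_serpent_alt (num_lines : Int) (num_cols : Int) : List (List Int) :=
  let num_cells := max num_lines 0 * max num_cols 0
  let flat := PySem.List.pyRange 1 (num_cells + 1) 1
  (PySem.List.pyRange 0 num_lines 1).foldl
    (fun (result : List (List Int)) i =>
      let row := PySem.List.slice flat (some (i * num_cols)) (some ((i + 1) * num_cols))
      result ++ [if i % 2 == 1 then row.reverse else row])
    []

-- ===== PRECONDITION & SPEC =====
def Spec_renvoie_tableau_serpent (num_lines : Int) (num_cols : Int) (out : List (List Int)) : Prop := out = renvoie_tableau_serpent_alt num_lines num_cols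
instance (num_lines : Int) (num_cols : Int) (out : List (List Int)) : Decidable (Spec_renvoie_tableau_serpent num_lines num_cols out) := by unfold Spec_renvoie_tableau_serpent; infer_instance

-- ===== CLAIM (what is proved, stated in full; the proofs are below) =====
def Claim_equal_renvoie_tableau_serpent : Prop := ∀ (num_lines : Int) (num_cols : Int), Dom_renvoie_tableau_serpent num_lines num_cols → Spec_renvoie_tableau_serpent num_lines num_cols (renvoie_tableau_serpent num_lines num_cols)

-- ===== LEMMAS AND PROOFS =====

-- the row produced for index i (common closed form, meaningful for 0 ≤ nc)
def pvRow (nc i : Int) : List Int :=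
  if i % 2 == 1 then (PySem.List.pyRange (i * nc + 1) ((i + 1) * nc + 1) 1).reverse
  else PySem.List.pyRange (i * nc + 1) ((i + 1) * nc + 1) 1

-- A's inner loop, iterated c times from elem e, yields the (possibly reversed) run e..e+c-1
theorem pvInnerA (i e : Int) (c : Nat) :
    (PySem.List.pyRange 0 (c : Int) 1).foldl
      (fun (ls : List Int × Int) _j =>
        (if i % 2 == 1 then PySem.List.insert ls.1 0 ls.2 else ls.1 ++ [ls.2], ls.2 + 1))
      ([], e)
    = ((if i % 2 == 1 then (PySem.List.pyRange e (e + c) 1).reverse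
        else PySem.List.pyRange e (e + c) 1), e + c) := by
  induction c with
  | zero =>
      simp [PySem.List.pyRange_one_eq_nil (le_refl (0:Int))]
  | succ c ih =>
      have hc : ((c + 1 : Nat) : Int) = (c : Int) + 1 := by push_cast; ring
      rw [hc, PySem.List.pyRange_one_succ_right (by positivity), List.foldl_append, ih]
      have he : e + ((c : Int) + 1) = (e + c) + 1 := by ring
      rw [he, PySem.List.pyRange_one_succ_right (by omega : e ≤ e + (c : Int))]
      cases h : (i % 2 == 1) with
      | true => simp [PySem.List.insert_zero]
      | false => simp

-- A's outer loop in closed form (0 ≤ nc case, num_lines = n)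
theorem pvOuterA (nc : Int) (hnc : 0 ≤ nc) (n : Nat) :
    (PySem.List.pyRange 0 (n : Int) 1).foldl
      (fun (st : List (List Int) × Int) i =>
        let inner := (PySem.List.pyRange 0 nc 1).foldl
          (fun (ls : List Int × Int) _j =>
            (if i % 2 == 1 then PySem.List.insert ls.1 0 ls.2 else ls.1 ++ [ls.2], ls.2 + 1))
          ([], st.2)
        (st.1 ++ [inner.1], inner.2))
      ([], 1)
    = ((PySem.List.pyRange 0 (n : Int) 1).map (pvRow nc), (n : Int) * nc + 1) := by
  obtain ⟨m, rfl⟩ : ∃ m : Nat, nc = (m : Int) := ⟨nc.toNat, (Int.toNat_of_nonneg hnc).symm⟩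
  induction n with
  | zero =>
      simp [PySem.List.pyRange_one_eq_nil (le_refl (0:Int))]
  | succ n ih =>
      have hc : ((n + 1 : Nat) : Int) = (n : Int) + 1 := by push_cast; ring
      rw [hc, PySem.List.pyRange_one_succ_right (by positivity), List.foldl_append, ih,
          List.map_append]
      simp only [List.foldl_cons, List.foldl_nil, List.map_cons, List.map_nil]
      rw [pvInnerA]
      have h2 : (n : Int) * m + 1 + m = ((n : Int) + 1) * m + 1 := by ring
      simp only [pvRow, h2]

-- B's row slice equals the closed-form run (0 ≤ nc, 0 ≤ i < nl)
theorem pvSliceB (nl nc i : Int) (hnc : 0 ≤ nc) (hi : 0 ≤ i) (hin : i < nl) :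
    PySem.List.slice (PySem.List.pyRange 1 (nl * nc + 1) 1)
      (some (i * nc)) (some ((i + 1) * nc))
    = PySem.List.pyRange (i * nc + 1) ((i + 1) * nc + 1) 1 := by
  have ha : 0 ≤ i * nc := mul_nonneg hi hnc
  have hb : i * nc ≤ (i + 1) * nc := by nlinarith
  have hbn : (i + 1) * nc ≤ nl * nc := by nlinarith
  rw [PySem.List.pyRange_one_append 1 (i * nc + 1) (nl * nc + 1) (by omega) (by omega),
      PySem.List.pyRange_one_append (i * nc + 1) ((i + 1) * nc + 1) (nl * nc + 1)
        (by omega) (by omega),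
      PySem.List.slice_toNat _ ha (le_trans ha hb),
      List.drop_left' (by rw [PySem.List.length_pyRange_one]; omega),
      List.take_left' (by rw [PySem.List.length_pyRange_one]; omega)]

-- A's outer step with an empty inner loop only appends empty rows
theorem pvEmptyRows (l : List Int) (acc : List (List Int)) (e : Int) :
    l.foldl (fun (st : List (List Int) × Int) _ => (st.1 ++ [([] : List Int)], st.2)) (acc, e)
    = (acc ++ l.map (fun _ => []), e) := by
  induction l generalizing acc with
  | nil => simp
  | cons x xs ih => simp [ih]

-- ===== VERDICT (by name: the statement is the Claim_ definition above) =====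
theorem renvoie_tableau_serpent_spec : Claim_equal_renvoie_tableau_serpent := by
  intro nl nc _
  unfold Spec_renvoie_tableau_serpent
  simp only [renvoie_tableau_serpent, renvoie_tableau_serpent_alt]
  rcases le_or_gt 0 nc with hnc | hnc
  · rcases le_or_gt 0 nl with hnl | hnl
    · obtain ⟨n, rfl⟩ : ∃ n : Nat, nl = (n : Int) := ⟨nl.toNat, (Int.toNat_of_nonneg hnl).symm⟩
      rw [max_eq_left hnl, max_eq_left hnc,
          pvOuterA nc hnc n, PySem.List.foldl_append_singleton_eq_map, List.nil_append]
      apply List.map_congr_left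
      intro i hi
      rw [PySem.List.mem_pyRange_one] at hi
      rw [pvSliceB (n : Int) nc i hnc hi.1 hi.2]
      simp [pvRow]
    · simp [PySem.List.pyRange_one_eq_nil (by omega : nl ≤ (0 : Int))]
  · rcases le_or_gt nl 0 with hnl | hnl
    · simp [PySem.List.pyRange_one_eq_nil (by omega : nl ≤ (0 : Int))]
    · rw [max_eq_right (le_of_lt hnc), mul_zero]
      simp only [PySem.List.pyRange_one_eq_nil (by omega : nc ≤ (0 : Int)),
        PySem.List.pyRange_one_eq_nil (by omega : (0 : Int) + 1 ≤ 1), List.foldl_nil]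
      rw [pvEmptyRows, PySem.List.foldl_append_singleton_eq_map, List.nil_append,
          List.nil_append]
      apply List.map_congr_left
      intro i _
      simp [PySem.List.slice]
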